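-- pv_equiv track=rewrite | github.com/intentodemusico/Cripto | Taller2/02-ADFGVXCypher.py | key_sort
-- ===== SOURCE A (Python) =====
-- def key_sort(key):
--     key_bis = []
--     key = list(key)
--     len_key = len(key)
--     for i in range(0,len_key): key_bis.append((key[i],0))
--     flag = False
--     lst = []
--     for i in range(0,len_key):
--         menor = i
--         for ii in range(i+1,len_key):
--             if ord(key[ii])<ord(key[menor]):
--                 menor = ii
--                 flag = True
--         if flag:
--             tmp = key[i]
--             key[i] = key[menor]
--             key[menor] = tmp
--         index = key_bis.index((key[i],0))
--         lst.append(key_bis.index((key[i],0)))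
--         key_bis[index] = (key_bis[index][0],1)
--         flag = False
--     return lst
-- ===== SOURCE B (Python) =====
-- def key_sort(key):
--     return sorted(range(len(key)), key=lambda i: (ord(key[i]), i))
-- ===== Notes on version B (the rewrite author's own statement) =====
-- stated objective: faster
-- what changed: Replaces the quadratic selection-sort loop with its marker-table index bookkeeping by a single call to the library stable sort over range(len(key)) keyed by (code point, index).
import Mathlib
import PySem

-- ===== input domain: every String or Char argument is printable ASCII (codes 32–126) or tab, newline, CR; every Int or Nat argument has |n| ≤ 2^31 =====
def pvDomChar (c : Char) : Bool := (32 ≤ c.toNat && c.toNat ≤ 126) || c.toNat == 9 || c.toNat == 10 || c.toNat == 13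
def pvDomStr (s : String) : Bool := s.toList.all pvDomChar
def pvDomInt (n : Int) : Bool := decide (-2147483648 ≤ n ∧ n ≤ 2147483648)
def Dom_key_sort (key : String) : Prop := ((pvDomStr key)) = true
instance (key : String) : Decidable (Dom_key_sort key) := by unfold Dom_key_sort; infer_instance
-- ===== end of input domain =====

-- B replaces A's quadratic selection-sort argsort (with a marker-table index scan) by the
-- library stable sort of range(len(key)) keyed by (code point, index); return value only.

-- ===== PORT A =====
-- ord(c) of a 1-char string is its code point: exact as Char.toNat
def pyOrd (c : Char) : Int := (c.toNat : Int)

-- inner loop: for ii in range(i+1, len_key): if ord(key[ii]) < ord(key[menor]): menor = ii; flag = True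
def innerMin (ky : List Char) (lenKey i : Int) (menor0 : Int) (flag0 : Bool) : Int × Bool :=
  (PySem.List.pyRange (i+1) lenKey 1).foldl
    (fun p ii =>
      if pyOrd (PySem.List.pyGetD ky ii ' ') < pyOrd (PySem.List.pyGetD ky p.1 ' ')
      then (ii, true) else p)
    (menor0, flag0)

-- one iteration of the outer loop; state = (key, key_bis, lst, flag)
def sortStep (lenKey : Int) (st : List Char × List (Char × Int) × List Int × Bool) (i : Int) :
    List Char × List (Char × Int) × List Int × Bool :=
  let ky := st.1
  let kb := st.2.1
  let lst := st.2.2.1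
  let flag := st.2.2.2
  let mf := innerMin ky lenKey i i flag
  let menor := mf.1
  let flag1 := mf.2
  let ky1 :=
    if flag1 then
      let tmp := PySem.List.pyGetD ky i ' '
      PySem.List.pySetD (PySem.List.pySetD ky i (PySem.List.pyGetD ky menor ' ')) menor tmp
    else ky
  -- index = key_bis.index((key[i], 0)); Python raises ValueError when absent — unreachable here
  let index : Int :=
    ((PySem.List.index? kb (PySem.List.pyGetD ky1 i ' ', (0 : Int))).getD 0 : Nat)
  let lst1 := lst ++ [index]
  let kb1 := PySem.List.pySetD kb index ((PySem.List.pyGetD kb index (' ', 0)).1, 1)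
  (ky1, kb1, lst1, false)

def key_sort (key : String) : List Int :=
  let key1 : List Char := key.toList
  let lenKey : Int := PySem.Str.len key
  let keyBis := (PySem.List.pyRange 0 lenKey 1).foldl
    (fun kb i => kb ++ [(PySem.List.pyGetD key1 i ' ', (0 : Int))]) ([] : List (Char × Int))
  let st := (PySem.List.pyRange 0 lenKey 1).foldl (sortStep lenKey) (key1, keyBis, ([] : List Int), false)
  st.2.2.1

-- ===== PORT B =====
def key_sort_alt (key : String) : List Int :=
  PySem.List.sorted2 (PySem.List.pyRange 0 (PySem.Str.len key) 1)
    (fun i => pyOrd (PySem.List.pyGetD key.toList i ' '))   -- ord(key[i]); i ∈ range(len(key))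
    (fun i => i)

-- ===== PRECONDITION & SPEC =====
def Spec_key_sort (key : String) (out : List Int) : Prop := out = key_sort_alt key
instance (key : String) (out : List Int) : Decidable (Spec_key_sort key out) := by unfold Spec_key_sort; infer_instance

-- ===== CLAIM (what is proved, stated in full; the proofs are below) =====
def Claim_equal_key_sort : Prop := ∀ (key : String), Dom_key_sort key → Spec_key_sort key (key_sort key)

-- ===== LEMMAS AND PROOFS =====

-- total Int-indexed read, for nonnegative indices (what every in-range access below reduces to)
-- code point of the character of cs at Int position x (reads like A's ord(key[x]))
def ogAt (cs : List Char) (x : Int) : Int := pyOrd (cs.getD x.toNat ' ')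

-- strict "code point, then original position" order on indices into cs
def lexlt (cs : List Char) (a b : Int) : Prop :=
  ogAt cs a < ogAt cs b ∨ (ogAt cs a = ogAt cs b ∧ a < b)

-- the key_bis list determined by the original characters and the already-emitted indices l
def marksOf (cs : List Char) (l : List Int) : List (Char × Int) :=
  (List.range cs.length).map (fun j => (cs.getD j ' ', if ((j : Int) ∈ l) then (1 : Int) else 0))

-- the outer-loop invariant of A after i iterations
def InvA (cs : List Char) (i : Nat) (st : List Char × List (Char × Int) × List Int × Bool) : Prop :=
  st.1.length = cs.length ∧
  st.1.Perm cs ∧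
  st.2.1 = marksOf cs st.2.2.1 ∧
  st.2.2.1.length = i ∧
  st.2.2.1.Nodup ∧
  (∀ x ∈ st.2.2.1, 0 ≤ x ∧ x < (cs.length : Int)) ∧
  st.2.2.1.Pairwise (lexlt cs) ∧
  st.1.take i = st.2.2.1.map (fun x => cs.getD x.toNat ' ') ∧
  (∀ a b : Int, 0 ≤ a → a < b → b < (cs.length : Int) →
      cs.getD a.toNat ' ' = cs.getD b.toNat ' ' → b ∈ st.2.2.1 → a ∈ st.2.2.1) ∧
  (∀ p q : Nat, p < i → p < q → q < cs.length →
      (st.1.getD p ' ').toNat ≤ (st.1.getD q ' ').toNat) ∧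
  st.2.2.2 = false

theorem innerMin_aux (ky : List Char) (i : Int) (k : Nat) :
    i ≤ (innerMin ky (i + 1 + k) i i false).1 ∧
    (innerMin ky (i + 1 + k) i i false).1 < i + 1 + k ∧
    (∀ j : Int, i ≤ j → j < i + 1 + k →
      pyOrd (PySem.List.pyGetD ky (innerMin ky (i + 1 + k) i i false).1 ' ')
        ≤ pyOrd (PySem.List.pyGetD ky j ' ')) ∧
    ((innerMin ky (i + 1 + k) i i false).2 = true ↔ (innerMin ky (i + 1 + k) i i false).1 ≠ i) := by
  induction k with
  | zero =>
    simp only [innerMin, Nat.cast_zero, add_zero, PySem.List.pyRange_one_eq_nil (le_refl (i+1)),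
      List.foldl_nil]
    refine ⟨le_refl i, by omega, ?_, by simp⟩
    intro j h1 h2
    have : j = i := by omega
    simp [this]
  | succ k ih =>
    have hcast : i + 1 + ((k + 1 : Nat) : Int) = (i + 1 + (k : Int)) + 1 := by push_cast; ring
    rw [show (innerMin ky (i + 1 + ((k+1:Nat):Int)) i i false) =
        (innerMin ky ((i + 1 + (k:Int)) + 1) i i false) from by rw [hcast]] at *
    unfold innerMin at *
    rw [PySem.List.pyRange_one_succ_right (by omega), List.foldl_append, List.foldl_cons,
      List.foldl_nil]
    set p := (PySem.List.pyRange (i+1) (i+1+(k:Int)) 1).foldl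
      (fun p ii =>
        if pyOrd (PySem.List.pyGetD ky ii ' ') < pyOrd (PySem.List.pyGetD ky p.1 ' ')
        then (ii, true) else p) (i, false) with hp
    obtain ⟨h1, h2, h3, h4⟩ := ih
    by_cases hc : pyOrd (PySem.List.pyGetD ky (i+1+(k:Int)) ' ') < pyOrd (PySem.List.pyGetD ky p.1 ' ')
    · rw [if_pos hc]
      refine ⟨by omega, by omega, ?_, by constructor <;> intro <;> [omega; rfl]⟩
      intro j hj1 hj2
      by_cases hj : j = i + 1 + (k:Int)
      · simp [hj]
      · exact le_trans (le_of_lt hc) (h3 j hj1 (by omega))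
    · rw [if_neg hc]
      refine ⟨h1, by omega, ?_, h4⟩
      intro j hj1 hj2
      by_cases hj : j = i + 1 + (k:Int)
      · rw [hj]; omega
      · exact h3 j hj1 (by omega)


theorem innerMin_spec (ky : List Char) (n i : Int) (_hi : 0 ≤ i) (hin : i < n) :
    i ≤ (innerMin ky n i i false).1 ∧
    (innerMin ky n i i false).1 < n ∧
    (∀ j : Int, i ≤ j → j < n →
      pyOrd (PySem.List.pyGetD ky (innerMin ky n i i false).1 ' ')
        ≤ pyOrd (PySem.List.pyGetD ky j ' ')) ∧
    ((innerMin ky n i i false).2 = true ↔ (innerMin ky n i i false).1 ≠ i) := by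
  have h : n = i + 1 + ((n - i - 1).toNat : Int) := by omega
  rw [h]
  exact innerMin_aux ky i (n - i - 1).toNat



theorem pyGetD_nonneg_eq_getD' (xs : List Char) (x : Int) (d : Char) (h : 0 ≤ x) :
    PySem.List.pyGetD xs x d = xs.getD x.toNat d := by
  simp only [PySem.List.pyGetD, PySem.List.pyGet?, PySem.List.pyIdx?, if_pos h]
  by_cases hx : x < xs.length
  · rw [if_pos hx]; simp [List.getD]
  · rw [if_neg hx]
    rw [List.getD, List.getElem?_eq_none (by omega)]
    simp


theorem index?_eq_some_of {α : Type} [BEq α] [LawfulBEq α] (xs : List α) (v : α) (k : Nat)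
    (hk : k < xs.length) (hv : xs[k] = v) (hmin : ∀ j (hj : j < k), xs[j]'(by omega) ≠ v) :
    PySem.List.index? xs v = some k := by
  rw [PySem.List.index?_eq_some_iff]
  refine ⟨xs.take k, xs.drop (k+1), ?_, by simp [List.length_take]; omega, ?_⟩
  · conv_lhs => rw [← List.take_append_drop k xs]
    rw [List.drop_eq_getElem_cons hk, hv]
  · intro hmem
    obtain ⟨j, hj, hjeq⟩ := List.mem_take_iff_getElem.mp hmem
    exact hmin j (by omega) (by simpa using hjeq)

theorem index?_marksOf (cs : List Char) (l : List Int) (c : Char)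
    (h : ∃ j, j < cs.length ∧ cs.getD j ' ' = c ∧ ((j : Int) ∉ l)) :
    ∃ j0, PySem.List.index? (marksOf cs l) (c, (0 : Int)) = some j0 ∧
      j0 < cs.length ∧ cs.getD j0 ' ' = c ∧ ((j0 : Int) ∉ l) ∧
      (∀ j < j0, ¬(cs.getD j ' ' = c ∧ ((j : Int) ∉ l))) := by
  classical
  have h' : ∃ j, j < cs.length ∧ cs.getD j ' ' = c ∧ ((j : Int) ∉ l) := h
  let j0 := Nat.find h'
  obtain ⟨hj0n, hj0c, hj0m⟩ := Nat.find_spec h'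
  have hlen : (marksOf cs l).length = cs.length := by simp [marksOf]
  have hget : ∀ j (hj : j < cs.length),
      (marksOf cs l)[j]'(by omega) = (cs.getD j ' ', if ((j : Int) ∈ l) then (1 : Int) else 0) := by
    intro j hj; simp [marksOf]
  refine ⟨j0, ?_, hj0n, hj0c, hj0m, ?_⟩
  · refine index?_eq_some_of _ _ j0 (by omega) ?_ ?_
    · rw [hget j0 hj0n, hj0c, if_neg hj0m]
    · intro j hj heq
      rw [hget j (by omega)] at heq
      have h1 : cs.getD j ' ' = c := congrArg Prod.fst heq
      have h2 : (j : Int) ∉ l := by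
        intro hmem
        rw [if_pos hmem] at heq
        exact absurd (congrArg Prod.snd heq) (by simp)
      exact Nat.find_min h' hj ⟨by omega, h1, h2⟩
  · intro j hj ⟨h1, h2⟩
    exact Nat.find_min h' hj ⟨by omega, h1, h2⟩


theorem exists_unmarked (cs : List Char) (l : List Int) (ky : List Char) (i : Nat)
    (hperm : ky.Perm cs) (_hnd : l.Nodup)
    (_hbd : ∀ x ∈ l, 0 ≤ x ∧ x < (cs.length : Int))
    (htake : ky.take i = l.map (fun x => cs.getD x.toNat ' '))
    (_hlen : l.length = i) (hki : i < ky.length) :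
    ∃ j, j < cs.length ∧ cs.getD j ' ' = ky[i] ∧ ((j : Int) ∉ l) := by
  classical
  by_contra hcon
  push Not at hcon
  set n := cs.length with hn
  set c := ky[i] with hc
  -- cs as a map over range
  have hcs : cs = (List.range n).map (fun j => cs.getD j ' ') := by
    apply List.ext_getElem (by simp [hn])
    intro j h1 h2
    simp [List.getD_eq_getElem?_getD, List.getElem?_eq_getElem (by simpa using h2)]
  -- count of c in cs = number of positions of c
  have hcount1 : cs.count c = ((List.range n).filter (fun j => cs.getD j ' ' == c)).length := by
    conv_lhs => rw [hcs]
    rw [List.count, List.countP_map, List.countP_eq_length_filter]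
    rfl
  -- count in ky splits
  have hky : ky.count c = (ky.take i).count c + (ky.drop i).count c := by
    conv_lhs => rw [← List.take_append_drop i ky]
    exact List.count_append ..
  have hdrop : 1 ≤ (ky.drop i).count c := by
    rw [List.drop_eq_getElem_cons hki]
    rw [List.count_cons]
    simp [hc]
  have htakec : (ky.take i).count c = (l.filter (fun x => cs.getD x.toNat ' ' == c)).length := by
    rw [htake, List.count, List.countP_map, List.countP_eq_length_filter]
    rfl
  -- the marked positions of c cover all positions of c
  set l' := l.filter (fun x => cs.getD x.toNat ' ' == c) with hl'
  have hsub : ((List.range n).filter (fun j => cs.getD j ' ' == c)) ⊆ l'.map Int.toNat := by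
    intro j hj
    have hj1 : j < n := by simpa using (List.mem_filter.mp hj).1
    have hj2 : cs.getD j ' ' = c := by simpa using (List.mem_filter.mp hj).2
    have hjl : (j : Int) ∈ l := hcon j hj1 hj2
    have : (j : Int) ∈ l' := by
      rw [hl', List.mem_filter]
      exact ⟨hjl, by simpa using hj2⟩
    simpa using List.mem_map_of_mem this
  have hndT : ((List.range n).filter (fun j => cs.getD j ' ' == c)).Nodup :=
    (List.nodup_range).filter _
  have hle : ((List.range n).filter (fun j => cs.getD j ' ' == c)).length ≤ (l'.map Int.toNat).length :=
    ((List.subperm_of_subset hndT hsub)).length_le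
  have hl'len : (l'.map Int.toNat).length = l'.length := by simp
  have hcnt := hperm.count_eq c
  omega


theorem getD_set_swap (ky : List Char) (iN mN : Nat) (hi : iN < ky.length) (hm : mN < ky.length) (q : Nat) :
    ((ky.set iN (ky.getD mN ' ')).set mN (ky.getD iN ' ')).getD q ' ' =
    if q = mN then ky.getD iN ' ' else if q = iN then ky.getD mN ' ' else ky.getD q ' ' := by
  simp only [List.getD_eq_getElem?_getD, List.getElem?_set, List.length_set]
  by_cases h1 : q = mN
  · subst h1
    rw [if_pos rfl, if_pos hm]
    simp [List.getElem?_eq_getElem hi]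
  · rw [if_neg (fun hh => h1 hh.symm), if_neg h1]
    by_cases h2 : q = iN
    · subst h2
      rw [if_pos rfl, if_pos hi]
      simp [List.getElem?_eq_getElem hm]
    · rw [if_neg (fun hh => h2 hh.symm), if_neg h2]

theorem sortStep_inv (cs : List Char) (i : Nat) (st : List Char × List (Char × Int) × List Int × Bool)
    (hinv : InvA cs i st) (hin : i < cs.length) :
    InvA cs (i + 1) (sortStep (cs.length : Int) st ((i : Nat) : Int)) := by
  obtain ⟨ky, kb, l, fl⟩ := st
  obtain ⟨hlen, hperm, hkb, hllen, hnd, hbd, hpw, htake, hdc, hfront, hfl⟩ := hinv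
  simp only at hlen hperm hkb hllen hnd hbd hpw htake hdc hfront hfl
  subst hfl hkb
  simp only [sortStep]
  set mf := innerMin ky ((cs.length : Nat) : Int) ((i:Nat):Int) ((i:Nat):Int) false with hmfdef
  obtain ⟨hm1, hm2, hm3, hm4⟩ := innerMin_spec ky ((cs.length : Nat):Int) ((i:Nat):Int)
    (by omega) (by exact_mod_cast hin)
  rw [← hmfdef] at hm1 hm2 hm3 hm4
  set mN := mf.1.toNat with hmN
  have hmN1 : i ≤ mN := by omega
  have hmN2 : mN < cs.length := by omega
  have hmcast : (mN : Int) = mf.1 := by omega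
  -- facts about the (possibly) swapped list
  set ky1 := (if mf.2 = true then
      PySem.List.pySetD (PySem.List.pySetD ky ((i:Nat):Int) (PySem.List.pyGetD ky mf.1 ' ')) mf.1
        (PySem.List.pyGetD ky ((i:Nat):Int) ' ')
    else ky) with hky1def
  have hky1 : ky1 = (ky.set i (ky.getD mN ' ')).set mN (ky.getD i ' ') ∨ (ky1 = ky ∧ mN = i) := by
    by_cases hf : mf.2 = true
    · left
      rw [hky1def, if_pos hf,
        pyGetD_nonneg_eq_getD' _ _ _ (by omega : (0:Int) ≤ ((i:Nat):Int)),
        pyGetD_nonneg_eq_getD' _ _ _ (by omega : (0:Int) ≤ mf.1),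
        PySem.List.pySetD_of_nonneg _ _ (by omega : (0:Int) ≤ ((i:Nat):Int)),
        PySem.List.pySetD_of_nonneg _ _ (by omega : (0:Int) ≤ mf.1)]
      simp [hmN]
    · right
      have : mf.1 = ((i:Nat):Int) := by
        by_contra hne
        exact hf (hm4.mpr hne)
      refine ⟨by rw [hky1def, if_neg hf], by omega⟩
  have hlen1 : ky1.length = cs.length := by
    rcases hky1 with h | ⟨h, _⟩ <;> simp [h, hlen]
  have hperm1 : ky1.Perm ky := by
    rcases hky1 with h | ⟨h, _⟩
    · rw [h]
      have h1 : ky.getD mN ' ' = ky[mN]'(by omega) := List.getD_eq_getElem _ _ (by omega)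
      have h2 : ky.getD i ' ' = ky[i]'(by omega) := List.getD_eq_getElem _ _ (by omega)
      rw [h1, h2]
      exact List.set_set_perm (by omega) (by omega)
    · rw [h]
  have htake1 : ky1.take i = ky.take i := by
    rcases hky1 with h | ⟨h, _⟩
    · rw [h, List.take_set_of_le (by omega), List.take_set_of_le (by omega)]
    · rw [h]
  have hgetDtake1 : ∀ p : Nat, p < i → ky1.getD p ' ' = ky.getD p ' ' := by
    intro p hp
    rcases hky1 with h | ⟨h, _⟩
    · rw [h, getD_set_swap ky i mN (by omega) (by omega) p, if_neg (by omega), if_neg (by omega)]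
    · rw [h]
  have hmin1 : ky1.getD i ' ' = ky.getD mN ' ' := by
    rcases hky1 with h | ⟨h, he⟩
    · rw [h, getD_set_swap ky i mN (by omega) (by omega) i]
      by_cases hmi : i = mN
      · rw [if_pos hmi, hmi]
      · rw [if_neg hmi, if_pos rfl]
    · rw [h, he]
  have htail1 : ∀ q : Nat, i ≤ q → q < cs.length →
      ∃ r : Nat, i ≤ r ∧ r < cs.length ∧ ky1.getD q ' ' = ky.getD r ' ' := by
    intro q hq1 hq2
    rcases hky1 with h | ⟨h, _⟩
    · rw [h, getD_set_swap ky i mN (by omega) (by omega) q]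
      by_cases hq : q = mN
      · exact ⟨i, le_refl i, by omega, by rw [if_pos hq]⟩
      · rw [if_neg hq]
        by_cases hq' : q = i
        · exact ⟨mN, hmN1, hmN2, by rw [if_pos hq']⟩
        · exact ⟨q, hq1, hq2, by rw [if_neg hq']⟩
    · exact ⟨q, hq1, hq2, by rw [h]⟩
  have hminall : ∀ r : Nat, i ≤ r → r < cs.length →
      (ky.getD mN ' ').toNat ≤ (ky.getD r ' ').toNat := by
    intro r hr1 hr2
    have := hm3 ((r:Nat):Int) (by omega) (by omega)
    rw [pyGetD_nonneg_eq_getD' _ _ _ (by omega : (0:Int) ≤ mf.1),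
      pyGetD_nonneg_eq_getD' _ _ _ (by omega : (0:Int) ≤ ((r:Nat):Int)), ← hmN] at this
    simp only [pyOrd, Int.toNat_natCast, Int.ofNat_le] at this
    exact_mod_cast this
  -- the character selected this round
  have hc0 : PySem.List.pyGetD ky1 ((i : Nat) : Int) ' ' = ky.getD mN ' ' := by
    rw [pyGetD_nonneg_eq_getD' _ _ _ (by omega)]
    simpa using hmin1
  have hex : ∃ j, j < cs.length ∧ cs.getD j ' ' = ky.getD mN ' ' ∧ ((j : Int) ∉ l) := by
    have h := exists_unmarked cs l ky1 i (hperm1.trans hperm) hnd hbd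
      (by rw [htake1]; exact htake) hllen (by omega)
    have : ky1[i]'(by omega) = ky.getD mN ' ' := by
      rw [← hmin1]
      exact (List.getD_eq_getElem ky1 ' ' (by omega)).symm
    rwa [this] at h
  obtain ⟨j0, hidx, hj0n, hj0c, hj0m, hj0min⟩ := index?_marksOf cs l (ky.getD mN ' ') hex
  rw [hc0, hidx]
  simp only [Option.getD_some]
  set l1 := l ++ [((j0 : Nat) : Int)] with hl1def
  have hmarksget : ∀ (ll : List Int) (j : Nat), j < cs.length →
      (marksOf cs ll).getD j (' ', 0) = (cs.getD j ' ', if ((j : Int) ∈ ll) then (1 : Int) else 0) := by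
    intro ll j hj
    rw [List.getD_eq_getElem _ _ (by simp [marksOf]; omega)]
    simp [marksOf]
  have hkb1 : PySem.List.pySetD (marksOf cs l) ((j0 : Nat) : Int)
      ((PySem.List.pyGetD (marksOf cs l) ((j0 : Nat) : Int) (' ', 0)).1, 1) = marksOf cs l1 := by
    rw [PySem.List.pySetD_natCast, PySem.List.pyGetD_natCast, hmarksget l j0 hj0n]
    apply List.ext_getElem (by simp [marksOf])
    intro j h1 h2
    simp only [List.getElem_set]
    by_cases hj : j0 = j
    · subst hj
      rw [if_pos rfl]
      simp only [marksOf, List.getElem_map, List.getElem_range]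
      rw [if_pos (by simp [hl1def])]
    · rw [if_neg hj]
      simp only [marksOf, List.getElem_map, List.getElem_range]
      have : (((j : Nat) : Int) ∈ l1) ↔ (((j : Nat) : Int) ∈ l) := by
        simp only [hl1def, List.mem_append, List.mem_singleton]
        constructor
        · rintro (h | h)
          · exact h
          · exfalso; exact hj (by exact_mod_cast h.symm)
        · exact Or.inl
      rw [if_congr this rfl rfl]
  rw [hkb1]
  -- characters of emitted indices, as positions in ky.take i
  have hchar_mem : ∀ x ∈ l, ∃ t : Nat, t < i ∧ cs.getD x.toNat ' ' = ky.getD t ' ' := by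
    intro x hx
    obtain ⟨t, ht, hxt⟩ := List.getElem_of_mem hx
    have hti : t < i := by omega
    refine ⟨t, hti, ?_⟩
    have h2 : (List.take i ky)[t]? = some (cs.getD x.toNat ' ') := by
      rw [htake, List.getElem?_map, List.getElem?_eq_getElem ht]
      simp [hxt]
    have h3 : ky[t]? = some (cs.getD x.toNat ' ') := by
      rwa [List.getElem?_take, if_pos hti] at h2
    have h4 : ky.getD t ' ' = cs.getD x.toNat ' ' := by
      rw [List.getD_eq_getElem?_getD, h3]
      rfl
    exact h4.symm
  refine ⟨hlen1, hperm1.trans hperm, rfl, by simp [hl1def, hllen], ?_, ?_, ?_, ?_, ?_, ?_, rfl⟩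
  · -- nodup
    rw [hl1def, List.nodup_append]
    refine ⟨hnd, List.nodup_singleton _, ?_⟩
    intro a ha b hb
    have hb2 : b = ((j0 : Nat) : Int) := by simpa using hb
    subst hb2
    intro hcon
    rw [hcon] at ha
    exact hj0m ha
  · -- bounds
    intro x hx
    rcases List.mem_append.mp hx with h | h
    · exact hbd x h
    · have : x = ((j0 : Nat) : Int) := by simpa using h
      subst this
      constructor <;> [positivity; exact_mod_cast hj0n]
  · -- pairwise lexlt
    rw [hl1def, List.pairwise_append]
    refine ⟨hpw, List.pairwise_singleton _ _, ?_⟩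
    intro x hx y hy
    have hy' : y = ((j0 : Nat) : Int) := by simpa using hy
    subst hy'
    obtain ⟨t, hti, hxc⟩ := hchar_mem x hx
    have hord : (ky.getD t ' ').toNat ≤ (ky.getD mN ' ').toNat :=
      hfront t mN hti (by omega) hmN2
    have hogx : ogAt cs x = ((cs.getD x.toNat ' ').toNat : Int) := rfl
    have hogj : ogAt cs ((j0 : Nat) : Int) = ((ky.getD mN ' ').toNat : Int) := by
      simp only [ogAt, pyOrd, Int.toNat_natCast]
      rw [hj0c]
    rcases Nat.lt_or_ge (cs.getD x.toNat ' ').toNat (ky.getD mN ' ').toNat with hlt | hge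
    · left
      rw [hogx, hogj]
      exact_mod_cast hlt
    · -- equality of codes, hence of characters
      have hx2 := congrArg Char.toNat hxc
      have heq : (cs.getD x.toNat ' ').toNat = (ky.getD mN ' ').toNat := by omega
      have hcheq : cs.getD x.toNat ' ' = ky.getD mN ' ' :=
        Char.ext (UInt32.toNat_inj.mp heq)
      right
      refine ⟨by rw [hogx, hogj, heq], ?_⟩
      have hxbd := hbd x hx
      have hxne : x ≠ ((j0 : Nat) : Int) := by
        intro hcon
        exact hj0m (hcon ▸ hx)
      rcases lt_trichotomy x ((j0 : Nat) : Int) with h | h | h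
      · exact h
      · exact absurd h hxne
      · exfalso
        exact hj0m (hdc ((j0 : Nat) : Int) x (by positivity) h (by omega)
          (by rw [Int.toNat_natCast, hj0c, hcheq]) hx)
  · -- take
    rw [List.take_succ_eq_append_getElem (by omega : i < ky1.length), hl1def, List.map_append,
      htake1, htake]
    congr 1
    simp only [List.map_cons, List.map_nil]
    congr 1
    rw [Int.toNat_natCast, hj0c, ← hmin1]
    exact (List.getD_eq_getElem ky1 ' ' (by omega)).symm
  · -- downward closed
    intro a b ha hab hb hch hbm
    rcases List.mem_append.mp hbm with h | h
    · exact List.mem_append_left _ (hdc a b ha hab hb hch h)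
    · have hb' : b = ((j0 : Nat) : Int) := by simpa using h
      by_cases hal : a ∈ l
      · exact List.mem_append_left _ hal
      · exfalso
        apply hj0min a.toNat (by omega)
        refine ⟨?_, ?_⟩
        · rw [hb'] at hch
          rw [Int.toNat_natCast] at hch
          exact hch.trans hj0c
        · intro hmem
          exact hal (by rwa [Int.toNat_of_nonneg ha] at hmem)
  · -- sorted frontier
    intro p q hp hpq hq
    by_cases hpi : p < i
    · rw [hgetDtake1 p hpi]
      by_cases hqi : q < i
      · rw [hgetDtake1 q hqi]
        exact hfront p q hpi hpq hq
      · obtain ⟨r, hr1, hr2, hre⟩ := htail1 q (by omega) hq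
        rw [hre]
        exact hfront p r hpi (by omega) hr2
    · have hp' : p = i := by omega
      subst hp'
      rw [hmin1]
      obtain ⟨r, hr1, hr2, hre⟩ := htail1 q (by omega) hq
      rw [hre]
      exact hminall r hr1 hr2

theorem outer_inv (cs : List Char) (m : Nat) (hm : m ≤ cs.length) :
    InvA cs m ((PySem.List.pyRange 0 (m : Int) 1).foldl (sortStep (cs.length : Int))
      (cs, marksOf cs [], ([] : List Int), false)) := by
  induction m with
  | zero =>
    rw [show ((0:Nat):Int) = 0 from rfl, PySem.List.pyRange_one_eq_nil (le_refl 0), List.foldl_nil]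
    refine ⟨rfl, List.Perm.refl cs, rfl, rfl, List.nodup_nil, by simp, List.Pairwise.nil,
      by simp, by simp, by omega, rfl⟩
  | succ m ih =>
    have hcast : ((m+1 : Nat) : Int) = ((m:Nat):Int) + 1 := by push_cast; ring
    rw [hcast, PySem.List.pyRange_one_succ_right (by omega), List.foldl_append, List.foldl_cons,
      List.foldl_nil]
    exact sortStep_inv cs m _ (ih (by omega)) (by omega)

theorem key_sort_props (key : String) :
    (key_sort key).Perm (PySem.List.pyRange 0 (key.toList.length : Int) 1) ∧
    (key_sort key).Pairwise (lexlt key.toList) ∧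
    (∀ x ∈ key_sort key, 0 ≤ x ∧ x < (key.toList.length : Int)) := by
  set cs := key.toList with hcs
  have hkb0 : (PySem.List.pyRange 0 (PySem.Str.len key) 1).foldl
      (fun kb i => kb ++ [(PySem.List.pyGetD cs i ' ', (0:Int))]) [] = marksOf cs [] := by
    rw [PySem.List.foldl_append_singleton_eq_map, List.nil_append, PySem.Str.len_eq, ← hcs,
      PySem.List.pyRange_one, List.map_map]
    unfold marksOf
    simp only [Int.sub_zero, Int.toNat_natCast]
    apply List.map_congr_left
    intro j hj
    have hj' : j < cs.length := List.mem_range.mp hj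
    simp [Function.comp, PySem.List.pyGetD_natCast]
  have hks0 : key_sort key = ((PySem.List.pyRange 0 (PySem.Str.len key) 1).foldl
      (sortStep (PySem.Str.len key))
      (cs, (PySem.List.pyRange 0 (PySem.Str.len key) 1).foldl
        (fun kb i => kb ++ [(PySem.List.pyGetD cs i ' ', (0:Int))]) [], ([] : List Int),
        false)).2.2.1 := rfl
  have hks : key_sort key = ((PySem.List.pyRange 0 ((cs.length : Nat) : Int) 1).foldl
      (sortStep ((cs.length : Nat) : Int)) (cs, marksOf cs [], ([] : List Int), false)).2.2.1 := by
    rw [hks0, hkb0, PySem.Str.len_eq, ← hcs]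
  obtain ⟨h1, h2, h3, h4, h5, h6, h7, h8, h9, h10, h11⟩ := outer_inv cs cs.length (le_refl _)
  rw [← hks] at h4 h5 h6 h7
  refine ⟨?_, h7, h6⟩
  have hsub : key_sort key ⊆ PySem.List.pyRange 0 ((cs.length : Nat) : Int) 1 := by
    intro x hx
    exact PySem.List.mem_pyRange_one.mpr ⟨(h6 x hx).1, (h6 x hx).2⟩
  exact (List.subperm_of_subset h5 hsub).perm_of_length_le
    (by rw [PySem.List.length_pyRange_one]; omega)

theorem insertBy_congr {α : Type} (before before' : α → α → Bool) (x : α) (acc : List α)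
    (h : ∀ y ∈ acc, before x y = before' x y) :
    PySem.List.insertBy before x acc = PySem.List.insertBy before' x acc := by
  induction acc with
  | nil => rfl
  | cons y ys ih =>
    rw [PySem.List.insertBy.eq_def, PySem.List.insertBy.eq_def]
    simp only
    rw [h y (List.mem_cons_self), ih (fun z hz => h z (List.mem_cons_of_mem _ hz))]

theorem foldl_insertBy_congr {α : Type} (before before' : α → α → Bool) (S : α → Prop)
    (hb : ∀ a b, S a → S b → before a b = before' a b) :
    ∀ (xs acc : List α), (∀ x ∈ xs, S x) → (∀ x ∈ acc, S x) →
      xs.foldl (fun acc x => PySem.List.insertBy before x acc) acc =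
      xs.foldl (fun acc x => PySem.List.insertBy before' x acc) acc := by
  intro xs
  induction xs with
  | nil => intro acc _ _; rfl
  | cons x xs ih =>
    intro acc hxs hacc
    simp only [List.foldl_cons]
    have hx : S x := hxs x (List.mem_cons_self)
    rw [insertBy_congr before before' x acc (fun y hy => hb x y hx (hacc y hy))]
    apply ih _ (fun z hz => hxs z (List.mem_cons_of_mem _ hz))
    intro z hz
    rcases (PySem.List.mem_insertBy before' x z acc).mp hz with h | h
    · rw [h]; exact hx
    · exact hacc z h

theorem key_sort_alt_eq (key : String) (l : List Int)
    (hperm : l.Perm (PySem.List.pyRange 0 (key.toList.length : Int) 1))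
    (hpw : l.Pairwise (lexlt key.toList))
    (hbd : ∀ x ∈ l, 0 ≤ x ∧ x < (key.toList.length : Int)) :
    key_sort_alt key = l := by
  set cs := key.toList with hcs
  set n := ((cs.length : Nat) : Int) with hn
  set F : Int → Int := fun x => ogAt cs x * (n + 1) + x with hF
  have harith : ∀ a b : Int, 0 ≤ a → a < n → 0 ≤ b → b < n →
      ((ogAt cs a < ogAt cs b → F a < F b) ∧
        (ogAt cs a = ogAt cs b → (F a < F b ↔ a < b))) := by
    intro a b ha1 ha2 hb1 hb2
    constructor
    · intro hlt
      have e1 : (ogAt cs a + 1) * (n + 1) ≤ ogAt cs b * (n + 1) :=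
        mul_le_mul_of_nonneg_right (by omega) (by omega)
      have e2 : (ogAt cs a + 1) * (n + 1) = ogAt cs a * (n + 1) + (n + 1) := by ring
      simp only [hF]
      linarith
    · intro heq
      simp only [hF, heq]
      constructor <;> intro h <;> linarith
  have hagree : ∀ a b : Int, (0 ≤ a ∧ a < n) → (0 ≤ b ∧ b < n) →
      (decide (pyOrd (PySem.List.pyGetD cs a ' ') < pyOrd (PySem.List.pyGetD cs b ' ')) ||
        (!decide (pyOrd (PySem.List.pyGetD cs b ' ') < pyOrd (PySem.List.pyGetD cs a ' ')) &&
          decide (a < b))) = decide (F a < F b) := by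
    rintro a b ⟨ha1, ha2⟩ ⟨hb1, hb2⟩
    rw [pyGetD_nonneg_eq_getD' _ _ _ ha1, pyGetD_nonneg_eq_getD' _ _ _ hb1]
    have hA : pyOrd (cs.getD a.toNat ' ') = ogAt cs a := rfl
    have hB : pyOrd (cs.getD b.toNat ' ') = ogAt cs b := rfl
    rw [hA, hB]
    obtain ⟨g1, g2⟩ := harith a b ha1 ha2 hb1 hb2
    obtain ⟨g3, g4⟩ := harith b a hb1 hb2 ha1 ha2
    rcases lt_trichotomy (ogAt cs a) (ogAt cs b) with h | h | h
    · simp [h, g1 h]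
    · have l1 : ¬ (ogAt cs a < ogAt cs b) := by omega
      have l2 : ¬ (ogAt cs b < ogAt cs a) := by omega
      simp only [decide_eq_false l1, decide_eq_false l2, Bool.false_or, Bool.not_false,
        Bool.true_and]
      rw [decide_eq_decide]
      exact (g2 h).symm
    · have l1 : ¬ (ogAt cs a < ogAt cs b) := by omega
      have hFba := g3 h
      have l3 : ¬ (F a < F b) := by omega
      simp [decide_eq_false l1, h, l3]
  have hlenk : PySem.Str.len key = n := by rw [PySem.Str.len_eq]
  have e1 : key_sort_alt key = PySem.List.sorted2 (PySem.List.pyRange 0 n 1)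
      (fun i => pyOrd (PySem.List.pyGetD cs i ' ')) (fun i => i) false := by
    unfold key_sort_alt
    rw [hlenk]
  have e2 : PySem.List.sorted2 (PySem.List.pyRange 0 n 1)
      (fun i => pyOrd (PySem.List.pyGetD cs i ' ')) (fun i => i) false =
      (PySem.List.pyRange 0 n 1).foldl (fun acc x => PySem.List.insertBy
        (fun a b =>
          decide (pyOrd (PySem.List.pyGetD cs a ' ') < pyOrd (PySem.List.pyGetD cs b ' ')) ||
          (!decide (pyOrd (PySem.List.pyGetD cs b ' ') < pyOrd (PySem.List.pyGetD cs a ' ')) &&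
            decide (a < b))) x acc) [] := rfl
  have e3 : PySem.List.sorted (PySem.List.pyRange 0 n 1) F false =
      (PySem.List.pyRange 0 n 1).foldl (fun acc x => PySem.List.insertBy
        (fun a b => decide (F a < F b)) x acc) [] := rfl
  have hxsS : ∀ x ∈ PySem.List.pyRange 0 n 1, 0 ≤ x ∧ x < n := by
    intro x hx
    exact PySem.List.mem_pyRange_one.mp hx
  rw [e1, e2, foldl_insertBy_congr _ _ (fun x => 0 ≤ x ∧ x < n) hagree _ [] hxsS (by simp), ← e3]
  apply PySem.List.sorted_eq_of_perm_of_pairwise_lt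
  · exact hperm
  · refine hpw.imp_of_mem ?_
    intro a b ha hb hab
    obtain ⟨ha1, ha2⟩ := hbd a ha
    obtain ⟨hb1, hb2⟩ := hbd b hb
    rcases hab with h | ⟨h1, h2⟩
    · exact (harith a b ha1 ha2 hb1 hb2).1 h
    · exact ((harith a b ha1 ha2 hb1 hb2).2 h1).mpr h2


-- ===== VERDICT (by name: the statement is the Claim_ definition above) =====
theorem key_sort_spec : Claim_equal_key_sort := by
  intro key _
  unfold Spec_key_sort
  obtain ⟨hperm, hpw, hbd⟩ := key_sort_props key
  exact (key_sort_alt_eq key (key_sort key) hperm hpw hbd).symm
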